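-- pv_equiv track=rewrite | github.com/wggraham/interview-prep | interviewbit/ninja/deterministic-finite-automaton.py | automata3
-- ===== SOURCE A (Python) =====
-- from collections import deque, defaultdict
--
-- def automata3(zero_edges, one_edges, accept_states, start_state, n):
--     zeros = {v: i for i, v in enumerate(zero_edges)}
--     ones = {v: i for i, v in enumerate(one_edges)}
--
--     states = max(len(zero_edges) - 1, len(one_edges) - 1)
--
--     waysTo = defaultdict(int)
--     waysTo.update({(zero_edges[start_state], 1): 1, (one_edges[start_state], 1): 1})
--
--     for i in range(2, n + 1):
--         for state in range(states + 1):
--             waysTo[(state, i)] = (waysTo[(zeros[state], i - 1)] + waysTo[(ones[state], i - 1)]) % (10 ** 9 + 7)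
--
--         # unnecessary retarded cleanup for interviewbit.com
--         # for state in range(states + 1):
--         #     if (zeros[state], i - 1) in waysTo:
--         #         del waysTo[(zeros[state], i - 1)]
--         #     if (ones[state], i - 1) in waysTo:
--         #         del waysTo[(ones[state], i - 1)]
--
--     return sum(waysTo[(state, n)] for state in accept_states) % (10 ** 9 + 7)
-- ===== SOURCE B (Python) =====
-- # B: matrix exponentiation of A's preimage-based linear recurrence: O(d^3 log n) instead of A's O(n*d) table.
-- MOD = 10 ** 9 + 7
--
-- def _mat_mul(A, B, d):
--     return [[sum(A[i][k] * B[k][j] for k in range(d)) % MOD for j in range(d)]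
--             for i in range(d)]
--
-- def _mat_pow(R, M, d, e):
--     if e == 0:
--         return R
--     return _mat_pow(_mat_mul(R, M, d) if e % 2 == 1 else R, _mat_mul(M, M, d), d, e // 2)
--
-- def automata3(zero_edges, one_edges, accept_states, start_state, n):
--     s0 = zero_edges[start_state]
--     s1 = one_edges[start_state]
--     if n <= 0:
--         return 0
--     if n == 1:
--         return sum(1 for a in accept_states if a == s0 or a == s1) % MOD
--     zeros = {v: i for i, v in enumerate(zero_edges)}
--     ones = {v: i for i, v in enumerate(one_edges)}
--     d = max(len(zero_edges), len(one_edges))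
--     M = [[(1 if zeros[s] == j else 0) + (1 if ones[s] == j else 0) for j in range(d)]
--          for s in range(d)]
--     v = [1 if t == s0 or t == s1 else 0 for t in range(d)]
--     I = [[1 if i == j else 0 for j in range(d)] for i in range(d)]
--     P = _mat_pow(I, M, d, n - 1)
--     w = [sum(P[i][j] * v[j] for j in range(d)) % MOD for i in range(d)]
--     return sum(w[a] for a in accept_states if 0 <= a < d) % MOD
-- ===== Notes on version B (the rewrite author's own statement) =====
-- stated objective: faster
-- what changed: A fills a defaultdict with every (state, level) value up to level n; B builds the (d x d) transition matrix of the same preimage-based recurrence once and computes level n by binary matrix exponentiation modulo 1e9+7, handling n<=1 directly.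
import Mathlib
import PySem

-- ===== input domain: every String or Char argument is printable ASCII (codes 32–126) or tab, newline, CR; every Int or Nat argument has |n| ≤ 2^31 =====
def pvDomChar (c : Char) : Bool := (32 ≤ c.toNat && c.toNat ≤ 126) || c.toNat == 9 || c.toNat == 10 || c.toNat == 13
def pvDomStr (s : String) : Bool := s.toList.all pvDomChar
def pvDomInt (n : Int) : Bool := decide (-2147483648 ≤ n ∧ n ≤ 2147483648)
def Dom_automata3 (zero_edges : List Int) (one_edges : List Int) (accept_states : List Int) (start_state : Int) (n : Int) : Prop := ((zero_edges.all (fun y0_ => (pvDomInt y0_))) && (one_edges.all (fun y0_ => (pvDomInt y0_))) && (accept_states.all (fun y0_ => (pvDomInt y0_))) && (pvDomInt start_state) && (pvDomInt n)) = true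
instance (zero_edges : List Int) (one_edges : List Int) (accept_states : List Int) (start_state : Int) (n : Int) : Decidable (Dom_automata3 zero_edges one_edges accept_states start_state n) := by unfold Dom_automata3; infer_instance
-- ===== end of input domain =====

-- B replaces A's level-by-level dict DP with matrix exponentiation of the same preimage recurrence (O(d^3 log n) matrix work instead of n·d table entries).

-- ===== PORT A =====
def pvP : Int := 1000000007

-- {v: i for i, v in enumerate(xs)} — used by both Pythons verbatim
def pvLastIndex (xs : List Int) : PySem.Dict Int Int :=
  (PySem.List.enumerate xs 0).foldl (fun d p => d.insert p.2 p.1) PySem.Dict.empty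

-- body of A's inner 'for state in range(states+1)' loop
def pvAInner (zeros ones : PySem.Dict Int Int) (i : Int)
    (w : PySem.Dict (Int × Int) Int) (s : Int) : PySem.Dict (Int × Int) Int :=
  w.insert (s, i)
    (PySem.Int.mod (w.getD (zeros.getD s 0, i - 1) 0 + w.getD (ones.getD s 0, i - 1) 0) pvP)

-- body of A's outer 'for i in range(2, n+1)' loop
def pvAOuter (zeros ones : PySem.Dict Int Int) (states : Int)
    (w : PySem.Dict (Int × Int) Int) (i : Int) : PySem.Dict (Int × Int) Int :=
  (PySem.List.pyRange 0 (states + 1) 1).foldl (pvAInner zeros ones i) w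

def automata3 (zero_edges : List Int) (one_edges : List Int) (accept_states : List Int) (start_state : Int) (n : Int) : Int :=
  let zeros := pvLastIndex zero_edges
  let ones := pvLastIndex one_edges
  let states : Int := max ((zero_edges.length : Int) - 1) ((one_edges.length : Int) - 1)
  let w0 : PySem.Dict (Int × Int) Int :=
    (PySem.Dict.empty.insert (PySem.List.pyGetD zero_edges start_state 0, 1) 1).insert
      (PySem.List.pyGetD one_edges start_state 0, 1) 1
  let wf := (PySem.List.pyRange 2 (n + 1) 1).foldl (pvAOuter zeros ones states) w0
  PySem.Int.mod (accept_states.foldl (fun acc s => acc + wf.getD (s, n) 0) 0) pvP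

-- ===== PORT B =====
def pvMatMul (A B : List (List Int)) (d : Nat) : List (List Int) :=
  (List.range d).map (fun i => (List.range d).map (fun j =>
    PySem.Int.mod ((List.range d).foldl
      (fun a k => a + (A.getD i []).getD k 0 * (B.getD k []).getD j 0) 0) pvP))

def pvMatPow (R M : List (List Int)) (d : Nat) (e : Nat) : List (List Int) :=
  if e = 0 then R
  else pvMatPow (if e % 2 = 1 then pvMatMul R M d else R) (pvMatMul M M d) d (e / 2)
decreasing_by exact Nat.div_lt_self (Nat.pos_of_ne_zero (by assumption)) (by omega)

def pvIdent (d : Nat) : List (List Int) :=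
  (List.range d).map (fun i => (List.range d).map (fun j => if i = j then (1 : Int) else 0))

-- M = [[(1 if zeros[s]==j else 0)+(1 if ones[s]==j else 0) for j in range(d)] for s in range(d)]
def pvMB (d : Nat) (zeros ones : PySem.Dict Int Int) : List (List Int) :=
  (List.range d).map (fun (s : Nat) => (List.range d).map (fun (j : Nat) =>
    (if zeros.getD ((s : Nat) : Int) 0 = ((j : Nat) : Int) then (1 : Int) else 0) +
    (if ones.getD ((s : Nat) : Int) 0 = ((j : Nat) : Int) then (1 : Int) else 0)))

-- v = [1 if t == s0 or t == s1 else 0 for t in range(d)]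
def pvVB (d : Nat) (s0 s1 : Int) : List Int :=
  (List.range d).map (fun (t : Nat) => if ((t : Nat) : Int) = s0 ∨ ((t : Nat) : Int) = s1 then (1 : Int) else 0)

def automata3_alt (zero_edges : List Int) (one_edges : List Int) (accept_states : List Int) (start_state : Int) (n : Int) : Int :=
  let s0 := PySem.List.pyGetD zero_edges start_state 0
  let s1 := PySem.List.pyGetD one_edges start_state 0
  if n ≤ 0 then 0
  else if n = 1 then
    PySem.Int.mod (accept_states.foldl (fun t a => t + if a = s0 ∨ a = s1 then 1 else 0) 0) pvP
  else
    let zeros := pvLastIndex zero_edges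
    let ones := pvLastIndex one_edges
    let d : Nat := max zero_edges.length one_edges.length
    let M := pvMB d zeros ones
    let v := pvVB d s0 s1
    let P := pvMatPow (pvIdent d) M d (n - 1).toNat
    let w := (List.range d).map (fun i =>
      PySem.Int.mod ((List.range d).foldl (fun a j => a + (P.getD i []).getD j 0 * v.getD j 0) 0) pvP)
    PySem.Int.mod (accept_states.foldl
      (fun t a => t + if 0 ≤ a ∧ a < (d : Int) then w.getD a.toNat 0 else 0) 0) pvP

-- ===== PRECONDITION & SPEC =====
-- Pre_ excludes exactly the inputs where A raises: an out-of-range start_state (IndexError) and,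
-- for n ≥ 2, transition lists whose values do not cover every state 0..max(len)-1 (KeyError).
def Pre_automata3 (zero_edges : List Int) (one_edges : List Int) (accept_states : List Int) (start_state : Int) (n : Int) : Prop :=
  PySem.Raise.InRange zero_edges.length start_state ∧
  PySem.Raise.InRange one_edges.length start_state ∧
  (2 ≤ n → ∀ s ∈ PySem.List.pyRange 0 (max (zero_edges.length : Int) (one_edges.length : Int)) 1,
    s ∈ zero_edges ∧ s ∈ one_edges)
instance (zero_edges : List Int) (one_edges : List Int) (accept_states : List Int) (start_state : Int) (n : Int) : Decidable (Pre_automata3 zero_edges one_edges accept_states start_state n) := by unfold Pre_automata3; infer_instance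

def pvWitness_automata3 : List Int × List Int × List Int × Int × Int := ([1, 0], [0, 1], [0], 0, 3)

def Spec_automata3 (zero_edges : List Int) (one_edges : List Int) (accept_states : List Int) (start_state : Int) (n : Int) (out : Int) : Prop := out = automata3_alt zero_edges one_edges accept_states start_state n
instance (zero_edges : List Int) (one_edges : List Int) (accept_states : List Int) (start_state : Int) (n : Int) (out : Int) : Decidable (Spec_automata3 zero_edges one_edges accept_states start_state n out) := by unfold Spec_automata3; infer_instance

-- ===== CLAIM (what is proved, stated in full; the proofs are below) =====
def Claim_equal_automata3 : Prop := ∀ (zero_edges : List Int) (one_edges : List Int) (accept_states : List Int) (start_state : Int) (n : Int), Dom_automata3 zero_edges one_edges accept_states start_state n → Pre_automata3 zero_edges one_edges accept_states start_state n → Spec_automata3 zero_edges one_edges accept_states start_state n (automata3 zero_edges one_edges accept_states start_state n)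

-- ===== LEMMAS AND PROOFS =====

-- A's table value at level k (k ≥ 1), as a function of the state
def wayF (zf og : Int → Int) (dd s0 s1 : Int) : Nat → Int → Int
  | 0, _ => 0
  | 1, t => if t = s0 ∨ t = s1 then 1 else 0
  | (k + 2), t => if 0 ≤ t ∧ t < dd then
      PySem.Int.mod (wayF zf og dd s0 s1 (k + 1) (zf t) + wayF zf og dd s0 s1 (k + 1) (og t)) pvP
    else 0

def matZ (d : Nat) (L : List (List Int)) : Matrix (Fin d) (Fin d) (ZMod 1000000007) :=
  Matrix.of fun i j => (((L.getD i []).getD j 0 : Int) : ZMod 1000000007)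

def vecZ (d : Nat) (L : List Int) : Fin d → ZMod 1000000007 :=
  fun i => ((L.getD i 0 : Int) : ZMod 1000000007)

lemma pvLastIndex_append (xs : List Int) (x : Int) :
    pvLastIndex (xs ++ [x]) = (pvLastIndex xs).insert x xs.length := by
  unfold pvLastIndex
  rw [PySem.List.enumerate_append, List.foldl_append]
  simp [PySem.List.enumerate_cons, PySem.List.enumerate_nil]

lemma pvLastIndex_bounds (xs : List Int) (v : Int) (hv : v ∈ xs) :
    0 ≤ (pvLastIndex xs).getD v 0 ∧ (pvLastIndex xs).getD v 0 < (xs.length : Int) := by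
  induction xs using List.reverseRecOn with
  | nil => simp at hv
  | append_singleton ys y ih =>
    rw [pvLastIndex_append]
    by_cases h : v = y
    · subst h
      rw [PySem.Dict.getD_insert_self]
      constructor
      · positivity
      · simp
    · rw [PySem.Dict.getD_insert_of_ne _ _ _ h]
      have hv' : v ∈ ys := by
        rcases List.mem_append.mp hv with h1 | h1
        · exact h1
        · simp at h1; exact absurd h1 h
      have := ih hv'
      simp only [List.length_append, List.length_cons, List.length_nil]
      push_cast
      push_cast at this
      omega

lemma castmod (x : Int) : ((PySem.Int.mod x pvP : Int) : ZMod 1000000007) = (x : ZMod 1000000007) := by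
  have h : ((1000000007:ℤ) : ZMod 1000000007) = 0 := by exact_mod_cast ZMod.natCast_self 1000000007
  rw [show pvP = (1000000007:Int) from rfl, PySem.Int.mod_eq_emod_of_pos (by norm_num),
    Int.emod_def, Int.cast_sub, Int.cast_mul, h]
  ring

lemma mod_bounds (x : Int) : 0 ≤ PySem.Int.mod x pvP ∧ PySem.Int.mod x pvP < pvP := by
  exact ⟨PySem.Int.mod_nonneg _ (by norm_num [pvP]), PySem.Int.mod_lt _ (by norm_num [pvP])⟩

lemma cast_inj_mod {a b : Int} (ha : 0 ≤ a ∧ a < pvP) (hb : 0 ≤ b ∧ b < pvP)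
    (h : (a : ZMod 1000000007) = (b : ZMod 1000000007)) : a = b := by
  have h2 := (ZMod.intCast_eq_intCast_iff' a b 1000000007).mp h
  have hP : pvP = ((1000000007 : Nat) : Int) := rfl
  rw [Int.emod_eq_of_lt ha.1 (by rw [hP] at ha; exact_mod_cast ha.2),
    Int.emod_eq_of_lt hb.1 (by rw [hP] at hb; exact_mod_cast hb.2)] at h2
  exact h2

lemma foldl_add_range (d : Nat) (f : Nat → Int) (c : Int) :
    (List.range d).foldl (fun a k => a + f k) c = c + ∑ k ∈ Finset.range d, f k := by
  induction d with
  | zero => simp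
  | succ m ih => rw [List.range_succ, List.foldl_append, ih, Finset.sum_range_succ]; simp; ring

lemma getD_map_range' {α : Type} (f : Nat → α) (d i : Nat) (hi : i < d) (x : α) :
    (((List.range d).map f).getD i x) = f i := by
  rw [List.getD_eq_getElem?_getD]
  simp [List.getElem?_map, List.getElem?_range hi]

lemma matZ_mul (d : Nat) (A B : List (List Int)) :
    matZ d (pvMatMul A B d) = matZ d A * matZ d B := by
  funext i j
  show (((pvMatMul A B d).getD i []).getD j 0 : Int) = ((matZ d A * matZ d B) i j : ZMod 1000000007)
  unfold pvMatMul
  rw [getD_map_range' _ d i i.isLt, getD_map_range' _ d j j.isLt, castmod,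
    foldl_add_range _ _ 0]
  push_cast
  rw [Matrix.mul_apply, ← Fin.sum_univ_eq_sum_range, zero_add]
  simp [matZ]

lemma matZ_ident (d : Nat) : matZ d (pvIdent d) = 1 := by
  funext i j
  show (((pvIdent d).getD i []).getD j 0 : Int) = ((1 : Matrix (Fin d) (Fin d) (ZMod 1000000007)) i j)
  unfold pvIdent
  rw [getD_map_range' _ d i i.isLt, getD_map_range' _ d j j.isLt, Matrix.one_apply]
  split_ifs with h1 h2 h3 <;> simp_all [Fin.ext_iff]

lemma matZ_pow (d : Nat) (e : Nat) (R M : List (List Int)) :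
    matZ d (pvMatPow R M d e) = matZ d R * matZ d M ^ e := by
  induction e using Nat.strong_induction_on generalizing R M with
  | _ e ih =>
    rw [pvMatPow]
    by_cases he : e = 0
    · simp [he]
    · rw [if_neg he, ih (e / 2) (Nat.div_lt_self (Nat.pos_of_ne_zero he) (by omega)), matZ_mul]
      by_cases ho : e % 2 = 1
      · rw [if_pos ho, matZ_mul, ← sq, ← pow_mul, mul_assoc, ← pow_succ',
          show 2 * (e / 2) + 1 = e from by omega]
      · rw [if_neg ho, ← sq, ← pow_mul, show 2 * (e / 2) = e from by omega]

-- characterisation of the start dict of A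
lemma w0_getD (a b t j : Int) :
    (((PySem.Dict.empty.insert ((a : Int), (1 : Int)) (1 : Int)).insert (b, 1) 1).getD (t, j) 0)
      = if j = 1 ∧ (t = a ∨ t = b) then 1 else 0 := by
  by_cases h1 : ((t, j) : Int × Int) = (b, 1)
  · rw [h1, PySem.Dict.getD_insert_self]
    rw [Prod.mk.injEq] at h1
    rw [if_pos ⟨h1.2, Or.inr h1.1⟩]
  · rw [PySem.Dict.getD_insert_of_ne _ _ _ h1]
    by_cases h2 : ((t, j) : Int × Int) = (a, 1)
    · rw [h2, PySem.Dict.getD_insert_self]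
      rw [Prod.mk.injEq] at h2
      rw [if_pos ⟨h2.2, Or.inl h2.1⟩]
    · rw [PySem.Dict.getD_insert_of_ne _ _ _ h2]
      rw [Prod.mk.injEq] at h1 h2
      have : ¬ (j = 1 ∧ (t = a ∨ t = b)) := by
        rintro ⟨hj, ht | ht⟩
        · exact h2 ⟨ht, hj⟩
        · exact h1 ⟨ht, hj⟩
      rw [if_neg this]
      simp [PySem.Dict.getD, PySem.Dict.get?, PySem.Dict.empty]

lemma innerFoldAux (zeros ones : PySem.Dict Int Int) (i dd : Int) :
    ∀ (K : Nat) (a : Int), (dd - a).toNat ≤ K → ∀ (W : PySem.Dict (Int × Int) Int) (t j : Int),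
    (((PySem.List.pyRange a dd 1).foldl (pvAInner zeros ones i) W).getD (t, j) 0)
      = if j = i ∧ a ≤ t ∧ t < dd then
          PySem.Int.mod (W.getD (zeros.getD t 0, i - 1) 0 + W.getD (ones.getD t 0, i - 1) 0) pvP
        else W.getD (t, j) 0 := by
  intro K
  induction K with
  | zero =>
    intro a hK W t j
    rw [PySem.List.pyRange_one_eq_nil (by omega), List.foldl_nil,
      if_neg (by rintro ⟨_, h2, h3⟩; omega)]
  | succ K ih =>
    intro a hK W t j
    by_cases hlt : a < dd
    · rw [PySem.List.pyRange_one_cons hlt, List.foldl_cons, ih (a + 1) (by omega)]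
      have hne : ∀ z : Int, ((z, i - 1) : Int × Int) ≠ (a, i) := by
        intro z h; rw [Prod.mk.injEq] at h; omega
      show (if j = i ∧ a + 1 ≤ t ∧ t < dd then _ else _) = _
      unfold pvAInner
      rw [PySem.Dict.getD_insert_of_ne _ _ _ (hne _), PySem.Dict.getD_insert_of_ne _ _ _ (hne _)]
      by_cases hc : j = i ∧ a + 1 ≤ t ∧ t < dd
      · rw [if_pos hc, if_pos ⟨hc.1, by omega, hc.2.2⟩]
      · rw [if_neg hc]
        by_cases hta : t = a ∧ j = i
        · obtain ⟨rfl, rfl⟩ := hta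
          rw [PySem.Dict.getD_insert_self, if_pos ⟨rfl, le_refl _, hlt⟩]
        · rw [PySem.Dict.getD_insert_of_ne _ _ _ (by
            intro h; rw [Prod.mk.injEq] at h; exact hta ⟨h.1, h.2⟩), if_neg (by
            rintro ⟨h1, h2, h3⟩
            have hne' : t ≠ a := fun ht => hta ⟨ht, h1⟩
            exact hc ⟨h1, by omega, h3⟩)]
    · rw [PySem.List.pyRange_one_eq_nil (by omega), List.foldl_nil,
        if_neg (by rintro ⟨_, h2, h3⟩; omega)]

-- A's inner loop
lemma innerFold (zeros ones : PySem.Dict Int Int) (states i : Int) (W : PySem.Dict (Int × Int) Int)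
    (t j : Int) :
    ((pvAOuter zeros ones states W i).getD (t, j) 0)
      = if j = i ∧ 0 ≤ t ∧ t < states + 1 then
          PySem.Int.mod (W.getD (zeros.getD t 0, i - 1) 0 + W.getD (ones.getD t 0, i - 1) 0) pvP
        else W.getD (t, j) 0 := by
  unfold pvAOuter
  exact innerFoldAux zeros ones i (states + 1) (states + 1 - 0).toNat 0 (le_refl _) W t j

-- A's outer loop: the table agrees with wayF on every level 1..m
lemma outerFold (zeros ones : PySem.Dict Int Int) (states : Int) (s0 s1 : Int)
    (w0 : PySem.Dict (Int × Int) Int)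
    (hw0 : ∀ t j, w0.getD (t, j) 0 = if j = 1 ∧ (t = s0 ∨ t = s1) then 1 else 0)
    (m : Int) (hm : 1 ≤ m) :
    ∀ t j : Int,
    (((PySem.List.pyRange 2 (m + 1) 1).foldl (pvAOuter zeros ones states) w0).getD (t, j) 0)
      = if 1 ≤ j ∧ j ≤ m then
          wayF (fun t => zeros.getD t 0) (fun t => ones.getD t 0) (states + 1) s0 s1 j.toNat t
        else 0 := by
  induction m, hm using Int.le_induction with
  | base =>
    intro t j
    rw [PySem.List.pyRange_one_eq_nil (by omega), List.foldl_nil, hw0]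
    by_cases hj : j = 1
    · subst hj
      rw [show ((1 : Int)).toNat = 1 from rfl]
      simp only [wayF]
      split_ifs <;> tauto
    · rw [if_neg (by tauto), if_neg (by omega)]
  | succ m hm1 ih =>
    intro t j
    rw [show m + 1 + 1 = (m + 1) + 1 from rfl, PySem.List.pyRange_one_succ_right (by omega),
      List.foldl_append, List.foldl_cons, List.foldl_nil]
    rw [innerFold, show m + 1 - 1 = m from by ring, ih t j]
    obtain ⟨k, hk⟩ : ∃ k, m.toNat = k + 1 := ⟨m.toNat - 1, by omega⟩
    have hk1 : (m + 1).toNat = k + 2 := by omega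
    by_cases hc : j = m + 1 ∧ 0 ≤ t ∧ t < states + 1
    · rw [if_pos hc, ih (zeros.getD t 0) m, ih (ones.getD t 0) m,
        if_pos ⟨hm1, le_refl _⟩, if_pos ⟨hm1, le_refl _⟩,
        if_pos (show 1 ≤ j ∧ j ≤ m + 1 from ⟨by omega, by omega⟩), hc.1, hk1]
      simp only [wayF]
      rw [if_pos hc.2, hk]
    · rw [if_neg hc]
      by_cases h1 : 1 ≤ j ∧ j ≤ m
      · rw [if_pos h1, if_pos ⟨h1.1, by omega⟩]
      · rw [if_neg h1]
        by_cases h2 : 1 ≤ j ∧ j ≤ m + 1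
        · -- j = m + 1 and t out of range
          have hj : j = m + 1 := by omega
          have ht : ¬ (0 ≤ t ∧ t < states + 1) := fun h => hc ⟨hj, h⟩
          rw [if_pos h2, hj, hk1]
          simp only [wayF]
          rw [if_neg ht]
        · rw [if_neg h2]

lemma foldl_add_eq (l : List Int) (F G : Int → Int) (h : ∀ s ∈ l, F s = G s) :
    ∀ c : Int, l.foldl (fun a s => a + F s) c = l.foldl (fun a s => a + G s) c := by
  induction l with
  | nil => intro c; rfl
  | cons x xs ih =>
    intro c
    simp only [List.foldl_cons]
    rw [h x (by simp), ih (fun s hs => h s (by simp [hs]))]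

lemma dot_cast (d : Nat) (P : List (List Int)) (v : List Int) (i : Fin d) :
    (((List.range d).foldl (fun a j => a + (P.getD i []).getD j 0 * v.getD j 0) 0 : Int) : ZMod 1000000007)
      = (matZ d P).mulVec (vecZ d v) i := by
  rw [foldl_add_range]
  push_cast
  rw [← Fin.sum_univ_eq_sum_range, zero_add]
  simp [matZ, vecZ, Matrix.mulVec, dotProduct]

lemma matZ_pvMB_apply (d : Nat) (zeros ones : PySem.Dict Int Int) (i j : Fin d) :
    matZ d (pvMB d zeros ones) i j
      = (((if zeros.getD ((i : Nat) : Int) 0 = ((j : Nat) : Int) then (1 : Int) else 0) +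
          (if ones.getD ((i : Nat) : Int) 0 = ((j : Nat) : Int) then (1 : Int) else 0) : Int) : ZMod 1000000007) := by
  unfold matZ pvMB
  rw [Matrix.of_apply, getD_map_range' _ d i i.isLt, getD_map_range' _ d j j.isLt]

lemma vecZ_pvVB_apply (d : Nat) (s0 s1 : Int) (i : Fin d) :
    vecZ d (pvVB d s0 s1) i
      = ((if ((i : Nat) : Int) = s0 ∨ ((i : Nat) : Int) = s1 then (1 : Int) else 0 : Int) : ZMod 1000000007) := by
  unfold vecZ pvVB
  rw [getD_map_range' _ d i i.isLt]

lemma vec_induction (d : Nat) (zeros ones : PySem.Dict Int Int) (s0 s1 : Int)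
    (hz : ∀ t : Int, 0 ≤ t → t < (d : Int) → 0 ≤ zeros.getD t 0 ∧ zeros.getD t 0 < (d : Int))
    (ho : ∀ t : Int, 0 ≤ t → t < (d : Int) → 0 ≤ ones.getD t 0 ∧ ones.getD t 0 < (d : Int))
    (k : Nat) (i : Fin d) :
    ((wayF (fun t => zeros.getD t 0) (fun t => ones.getD t 0) (d : Int) s0 s1 (k + 1) (i : Int) : Int) : ZMod 1000000007)
      = ((matZ d (pvMB d zeros ones) ^ k).mulVec (vecZ d (pvVB d s0 s1))) i := by
  induction k generalizing i with
  | zero =>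
    rw [pow_zero, Matrix.one_mulVec, vecZ_pvVB_apply]
    simp only [wayF]
  | succ k ih =>
    have hi0 : (0 : Int) ≤ (i : Int) := by positivity
    have hi1 : ((i : Nat) : Int) < (d : Int) := by exact_mod_cast i.isLt
    obtain ⟨hz0, hz1⟩ := hz i hi0 hi1
    obtain ⟨ho0, ho1⟩ := ho i hi0 hi1
    set iz : Fin d := ⟨(zeros.getD (i : Int) 0).toNat, by omega⟩ with hiz
    set io : Fin d := ⟨(ones.getD (i : Int) 0).toNat, by omega⟩ with hio
    have hze : zeros.getD (i : Int) 0 = ((iz : Nat) : Int) := by simp [hiz]; omega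
    have hoe : ones.getD (i : Int) 0 = ((io : Nat) : Int) := by simp [hio]; omega
    show ((wayF _ _ _ _ _ (k + 2) (i : Int) : Int) : ZMod 1000000007) = _
    simp only [wayF]
    rw [if_pos ⟨hi0, hi1⟩, castmod, Int.cast_add, hze, hoe, ih iz, ih io,
      pow_succ', ← Matrix.mulVec_mulVec]
    set u := (matZ d (pvMB d zeros ones) ^ k).mulVec (vecZ d (pvVB d s0 s1)) with hu
    have hmv : (matZ d (pvMB d zeros ones)).mulVec u i
        = ∑ j : Fin d, matZ d (pvMB d zeros ones) i j * u j := by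
      simp [Matrix.mulVec, dotProduct]
    rw [hmv, Finset.sum_congr rfl (fun j _ => show matZ d (pvMB d zeros ones) i j * u j
        = (if j = iz then u j else 0) + (if j = io then u j else 0) from by
      have hsum : ∀ (a : Fin d), (if ((a : Nat) : Int) = ((j : Nat) : Int) then (1 : ZMod 1000000007) else 0) * u j
          = if j = a then u j else 0 := by
        intro a
        by_cases h : j = a
        · rw [h, if_pos rfl, if_pos rfl, one_mul]
        · rw [if_neg h, if_neg (fun hc => h (Fin.ext (by exact_mod_cast hc.symm))), zero_mul]
      rw [matZ_pvMB_apply, hze, hoe, Int.cast_add,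
        apply_ite (fun x : Int => (x : ZMod 1000000007)),
        apply_ite (fun x : Int => (x : ZMod 1000000007)),
        Int.cast_one, Int.cast_zero, add_mul, hsum iz, hsum io]),
      Finset.sum_add_distrib]
    rw [Finset.sum_ite_eq' Finset.univ iz u, Finset.sum_ite_eq' Finset.univ io u,
      if_pos (Finset.mem_univ _), if_pos (Finset.mem_univ _)]

-- ===== VERDICT (by name: the statement is the Claim_ definition above) =====
lemma foldl_add_zero (l : List Int) : ∀ c : Int, l.foldl (fun a (_ : Int) => a + 0) c = c := by
  induction l with
  | nil => intro c; rfl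
  | cons x xs ih =>
    intro c
    rw [List.foldl_cons, show c + (0 : Int) = c from add_zero c]
    exact ih c

theorem automata3_spec : Claim_equal_automata3 := by
  intro ze oe acc ss n _ hpre
  obtain ⟨hz0, hz1, hcov⟩ := hpre
  have hlen0 : 0 < ze.length := by simp [PySem.Raise.InRange] at hz0; omega
  have hlen1 : 0 < oe.length := by simp [PySem.Raise.InRange] at hz1; omega
  unfold Spec_automata3 automata3 automata3_alt
  dsimp only
  by_cases hn0 : n ≤ 0
  · rw [if_pos hn0, PySem.List.pyRange_one_eq_nil (by omega), List.foldl_nil,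
      foldl_add_eq acc _ (fun _ => (0 : Int)) (fun s _ => by
        rw [w0_getD]; exact if_neg (by rintro ⟨h1, _⟩; omega)) 0,
      foldl_add_zero]
    decide
  · by_cases hn1 : n = 1
    · subst hn1
      rw [if_neg (by omega), if_pos rfl, PySem.List.pyRange_one_eq_nil (by omega), List.foldl_nil]
      congr 1
      exact foldl_add_eq acc _ _ (fun s _ => by rw [w0_getD]; simp) 0
    · have hn2 : 2 ≤ n := by omega
      rw [if_neg (by omega), if_neg hn1]
      have hstates : max ((ze.length : Int) - 1) ((oe.length : Int) - 1) + 1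
          = ((max ze.length oe.length : Nat) : Int) := by push_cast; omega
      have hcov' : ∀ s : Int, 0 ≤ s → s < ((max ze.length oe.length : Nat) : Int) → s ∈ ze ∧ s ∈ oe := by
        intro s h1 h2
        refine hcov hn2 s ?_
        rw [PySem.List.mem_pyRange_one]
        push_cast at h2 ⊢
        omega
      have hzb : ∀ t : Int, 0 ≤ t → t < ((max ze.length oe.length : Nat) : Int) →
          0 ≤ (pvLastIndex ze).getD t 0 ∧ (pvLastIndex ze).getD t 0 < ((max ze.length oe.length : Nat) : Int) := by
        intro t h1 h2
        have hb := pvLastIndex_bounds ze t (hcov' t h1 h2).1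
        have : ((ze.length : Nat) : Int) ≤ ((max ze.length oe.length : Nat) : Int) := by push_cast; omega
        omega
      have hob : ∀ t : Int, 0 ≤ t → t < ((max ze.length oe.length : Nat) : Int) →
          0 ≤ (pvLastIndex oe).getD t 0 ∧ (pvLastIndex oe).getD t 0 < ((max ze.length oe.length : Nat) : Int) := by
        intro t h1 h2
        have hb := pvLastIndex_bounds oe t (hcov' t h1 h2).2
        have : ((oe.length : Nat) : Int) ≤ ((max ze.length oe.length : Nat) : Int) := by push_cast; omega
        omega
      congr 1
      refine foldl_add_eq acc _ _ (fun s _ => ?_) 0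
      rw [outerFold (pvLastIndex ze) (pvLastIndex oe) _ _ _ _
            (fun t j => w0_getD (PySem.List.pyGetD ze ss 0) (PySem.List.pyGetD oe ss 0) t j) n (by omega) s n,
        if_pos ⟨by omega, le_refl n⟩, hstates]
      obtain ⟨k, hk⟩ : ∃ k, n.toNat = k + 2 := ⟨n.toNat - 2, by omega⟩
      by_cases hs : 0 ≤ s ∧ s < ((max ze.length oe.length : Nat) : Int)
      · rw [if_pos hs]
        have hsd : s.toNat < max ze.length oe.length := by omega
        rw [getD_map_range' _ _ s.toNat hsd]
        set d : Nat := max ze.length oe.length with hd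
        set si : Fin d := ⟨s.toNat, hsd⟩ with hsi
        set M := pvMB d (pvLastIndex ze) (pvLastIndex oe) with hM
        set P := pvMatPow (pvIdent d) M d (n - 1).toNat with hP
        set v := pvVB d (PySem.List.pyGetD ze ss 0) (PySem.List.pyGetD oe ss 0) with hv
        refine cast_inj_mod ⟨?_, ?_⟩ (mod_bounds _) ?_
        · rw [hk]; simp only [wayF]; rw [if_pos hs]; exact (mod_bounds _).1
        · rw [hk]; simp only [wayF]; rw [if_pos hs]; exact (mod_bounds _).2
        · have hL : ((wayF (fun t => (pvLastIndex ze).getD t 0) (fun t => (pvLastIndex oe).getD t 0)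
              ((d : Nat) : Int) (PySem.List.pyGetD ze ss 0) (PySem.List.pyGetD oe ss 0) n.toNat s : Int) : ZMod 1000000007)
              = ((matZ d M ^ (k + 1)).mulVec (vecZ d v)) si := by
            rw [hk, show s = ((si : Nat) : Int) from by rw [hsi]; simp; omega]
            exact vec_induction d _ _ _ _ hzb hob (k + 1) si
          have hR : (((PySem.Int.mod ((List.range d).foldl
                (fun a j => a + (P.getD s.toNat []).getD j 0 * v.getD j 0) 0) pvP : Int)) : ZMod 1000000007)
              = ((matZ d M ^ (k + 1)).mulVec (vecZ d v)) si := by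
            rw [castmod]
            have hdc := dot_cast d P v si
            rw [show matZ d P = matZ d M ^ (k + 1) from by
              rw [hP, matZ_pow, matZ_ident, one_mul, show (n - 1).toNat = k + 1 from by omega]] at hdc
            exact hdc
          exact hL.trans hR.symm
      · rw [if_neg hs, hk]
        simp only [wayF]
        rw [if_neg hs]
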